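-- pv_equiv track=rewrite | github.com/Sensei-Snow/ESEO_Project-Challenge_Playfair | playfair_encrypt_functions.py | creerDigrammes
-- ===== SOURCE A (Python) =====
-- def creerDigrammes(text):
--     upper_text = text.upper()
--
--     digrammes_tab = []
--
--     tab_text = list(upper_text)
--
--     actual_char = 0
--     while actual_char < len(tab_text):
--         try:
--             if tab_text[actual_char] == tab_text[actual_char+1]:
--                 actual_digramme = (tab_text[actual_char], "§")
--                 digrammes_tab.append(actual_digramme)
--                 actual_char += 1
--             else:
--                 actual_digramme = (tab_text[actual_char], tab_text[actual_char+1])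
--                 digrammes_tab.append(actual_digramme)
--                 actual_char += 2
--         except:
--             actual_digramme = (tab_text[actual_char], "§")
--             digrammes_tab.append(actual_digramme)
--             actual_char += 1
--
--     return digrammes_tab
-- ===== SOURCE B (Python) =====
-- def creerDigrammes(text):
--     digrammes = []
--     pending = None
--     for c in text.upper():
--         if pending is None:
--             pending = c
--         elif pending == c:
--             digrammes.append((pending, "§"))
--             pending = c
--         else:
--             digrammes.append((pending, c))
--             pending = None
--     if pending is not None:
--         digrammes.append((pending, "§"))
--     return digrammes
-- ===== Notes on version B (the rewrite author's own statement) =====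
-- stated objective: simpler
-- what changed: Replaced A's index-stride while loop with try/except lookahead by a single for-loop state machine over the characters that carries the unpaired first letter between iterations.
import Mathlib
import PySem

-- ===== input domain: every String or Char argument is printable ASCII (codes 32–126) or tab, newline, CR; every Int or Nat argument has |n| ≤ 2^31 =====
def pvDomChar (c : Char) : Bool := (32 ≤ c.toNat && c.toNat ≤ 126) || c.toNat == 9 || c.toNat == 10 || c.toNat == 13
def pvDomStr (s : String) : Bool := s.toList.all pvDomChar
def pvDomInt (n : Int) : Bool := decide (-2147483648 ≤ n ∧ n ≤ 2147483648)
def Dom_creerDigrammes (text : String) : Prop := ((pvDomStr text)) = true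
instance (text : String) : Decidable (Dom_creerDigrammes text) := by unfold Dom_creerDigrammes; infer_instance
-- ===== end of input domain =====

-- B replaces A's index-stride while loop + try/except lookahead by a single-pass
-- 'pending' state machine over the characters; same digram list (objective: simpler).

-- ===== PORT A =====
-- while loop over index actual_char; the try/except IndexError on tab[actual_char+1]
-- is ported via pyGet? returning none exactly where Python raises.
def creerDigrammesLoopA (tab : List Char) (i : Nat) : List (String × String) :=
  if h : i < tab.length then
    match PySem.List.pyGet? tab ((i : Int) + 1) with
    | none => (String.ofList [tab[i]], "§") :: creerDigrammesLoopA tab (i + 1)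
    | some c2 =>
      if tab[i] = c2 then
        (String.ofList [tab[i]], "§") :: creerDigrammesLoopA tab (i + 1)
      else
        (String.ofList [tab[i]], String.ofList [c2]) :: creerDigrammesLoopA tab (i + 2)
  else []
termination_by tab.length - i

def creerDigrammes (text : String) : List (String × String) :=
  creerDigrammesLoopA (PySem.Str.upper text).toList 0

-- ===== PORT B =====
def creerDigrammesLoopB (pending : Option Char) (cs : List Char) : List (String × String) :=
  match cs with
  | [] =>
    match pending with
    | none => []
    | some p => [(String.ofList [p], "§")]
  | c :: rest =>
    match pending with
    | none => creerDigrammesLoopB (some c) rest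
    | some p =>
      if p = c then (String.ofList [p], "§") :: creerDigrammesLoopB (some c) rest
      else (String.ofList [p], String.ofList [c]) :: creerDigrammesLoopB none rest

def creerDigrammes_alt (text : String) : List (String × String) :=
  creerDigrammesLoopB none (PySem.Str.upper text).toList

-- ===== PRECONDITION & SPEC =====
def Spec_creerDigrammes (text : String) (out : List (String × String)) : Prop := out = creerDigrammes_alt text
instance (text : String) (out : List (String × String)) : Decidable (Spec_creerDigrammes text out) := by unfold Spec_creerDigrammes; infer_instance

-- ===== CLAIM (what is proved, stated in full; the proofs are below) =====
def Claim_equal_creerDigrammes : Prop := ∀ (text : String), Dom_creerDigrammes text → Spec_creerDigrammes text (creerDigrammes text)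

-- ===== LEMMAS AND PROOFS =====
theorem loopB_cons_none (c : Char) (rest : List Char) :
    creerDigrammesLoopB none (c :: rest) = creerDigrammesLoopB (some c) rest := rfl

theorem loopA_step_none (tab : List Char) (i : Nat) (h : i < tab.length)
    (hn : PySem.List.pyGet? tab ((i : Int) + 1) = none) :
    creerDigrammesLoopA tab i =
      (String.ofList [tab[i]], "§") :: creerDigrammesLoopA tab (i + 1) := by
  rw [creerDigrammesLoopA, dif_pos h, hn]

theorem loopA_step_some (tab : List Char) (i : Nat) (h : i < tab.length) (c2 : Char)
    (hs : PySem.List.pyGet? tab ((i : Int) + 1) = some c2) :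
    creerDigrammesLoopA tab i =
      if tab[i] = c2 then
        (String.ofList [tab[i]], "§") :: creerDigrammesLoopA tab (i + 1)
      else
        (String.ofList [tab[i]], String.ofList [c2]) :: creerDigrammesLoopA tab (i + 2) := by
  rw [creerDigrammesLoopA, dif_pos h, hs]

theorem loopA_eq_loopB (tab : List Char) (i : Nat) :
    creerDigrammesLoopA tab i = creerDigrammesLoopB none (tab.drop i) := by
  by_cases h : i < tab.length
  · have hdrop : tab.drop i = tab[i] :: tab.drop (i + 1) :=
      List.drop_eq_getElem_cons h
    have hget : PySem.List.pyGet? tab ((i : Int) + 1) = tab[i + 1]? := by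
      have hc : ((i : Int) + 1) = ((i + 1 : Nat) : Int) := by push_cast; ring
      rw [hc, PySem.List.pyGet?_natCast]
    rw [hdrop, loopB_cons_none]
    by_cases h1 : i + 1 < tab.length
    · have hdrop1 : tab.drop (i + 1) = tab[i + 1] :: tab.drop (i + 2) :=
        List.drop_eq_getElem_cons h1
      rw [loopA_step_some tab i h tab[i + 1]
            (by rw [hget, List.getElem?_eq_getElem h1]),
          hdrop1]
      show _ = if tab[i] = tab[i + 1] then
          (String.ofList [tab[i]], "§") :: creerDigrammesLoopB (some tab[i + 1]) (tab.drop (i + 2))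
        else
          (String.ofList [tab[i]], String.ofList [tab[i + 1]]) :: creerDigrammesLoopB none (tab.drop (i + 2))
      by_cases heq : tab[i] = tab[i + 1]
      · rw [if_pos heq, if_pos heq, loopA_eq_loopB tab (i + 1), hdrop1, loopB_cons_none]
      · rw [if_neg heq, if_neg heq, loopA_eq_loopB tab (i + 2)]
    · have hnone : PySem.List.pyGet? tab ((i : Int) + 1) = none := by
        rw [hget, List.getElem?_eq_none_iff]; omega
      have hd1 : tab.drop (i + 1) = [] := List.drop_eq_nil_of_le (by omega)
      rw [loopA_step_none tab i h hnone, loopA_eq_loopB tab (i + 1), hd1]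
      rfl
  · rw [creerDigrammesLoopA, dif_neg h, List.drop_eq_nil_of_le (by omega)]
    rfl
termination_by tab.length - i

-- ===== VERDICT (by name: the statement is the Claim_ definition above) =====
theorem creerDigrammes_spec : Claim_equal_creerDigrammes := by
  intro text _
  show creerDigrammes text = creerDigrammes_alt text
  unfold creerDigrammes creerDigrammes_alt
  simpa using loopA_eq_loopB (PySem.Str.upper text).toList 0
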